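-- pv_equiv track=rewrite | github.com/vladsf/cardapi-flask | app.py | get_issuing_network
-- ===== SOURCE A (Python) =====
-- issuing_network = {
--     "Mir"             : list(map(str, range(2200, 2204+1))),
--     "American Express": ['34', '37'],
--     "Visa"            : ['4'],
--     "Mastercard"      : list(map(str, range(51, 55+1))),
--     "JCB"             : list(map(str, range(3528, 3589+1))),
--     "China UnionPay"  : ["62"],
--     "UzCard"          : ["8600"],
--     "Humo"            : ["9860"],
--     "Troy"            : ["65", "9792"],
--     "Discover Card"   : ['6011'] + list(map(str, range(644, 649+1))) + ["65"],
--     "Diners Club International": ["36"],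
--     }
--
-- def get_issuing_network(card_number):
--     for network in issuing_network:
--         if card_number[0] in issuing_network[network]:
--             return network
--         elif card_number[0:2] in issuing_network[network]:
--             return network
--         elif card_number[0:3] in issuing_network[network]:
--             return network
--         elif card_number[0:4] in issuing_network[network]:
--             return network
--
--     return "Other"
-- ===== SOURCE B (Python) =====
-- PREFIX_TABLE = (
--       [(str(n), "Mir") for n in range(2200, 2205)]
--     + [("34", "American Express"), ("37", "American Express")]
--     + [("4", "Visa")]
--     + [(str(n), "Mastercard") for n in range(51, 56)]
--     + [(str(n), "JCB") for n in range(3528, 3590)]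
--     + [("62", "China UnionPay")]
--     + [("8600", "UzCard")]
--     + [("9860", "Humo")]
--     + [("65", "Troy"), ("9792", "Troy")]
--     + [("6011", "Discover Card")]
--     + [(str(n), "Discover Card") for n in range(644, 650)]
--     + [("65", "Discover Card")]
--     + [("36", "Diners Club International")]
-- )
--
--
-- def get_issuing_network(card_number):
--     for prefix, network in PREFIX_TABLE:
--         if card_number.startswith(prefix):
--             return network
--     return "Other"
-- ===== Notes on version B (the rewrite author's own statement) =====
-- stated objective: simpler
-- what changed: Replaces the dict-of-prefix-lists with a four-way slice-membership chain per network by a single flat (prefix, network) table scanned once with str.startswith, keeping the original priority order.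
-- outside the precondition, e.g. on get_issuing_network(''): A raises IndexError, B returns 'Other'
import Mathlib
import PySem

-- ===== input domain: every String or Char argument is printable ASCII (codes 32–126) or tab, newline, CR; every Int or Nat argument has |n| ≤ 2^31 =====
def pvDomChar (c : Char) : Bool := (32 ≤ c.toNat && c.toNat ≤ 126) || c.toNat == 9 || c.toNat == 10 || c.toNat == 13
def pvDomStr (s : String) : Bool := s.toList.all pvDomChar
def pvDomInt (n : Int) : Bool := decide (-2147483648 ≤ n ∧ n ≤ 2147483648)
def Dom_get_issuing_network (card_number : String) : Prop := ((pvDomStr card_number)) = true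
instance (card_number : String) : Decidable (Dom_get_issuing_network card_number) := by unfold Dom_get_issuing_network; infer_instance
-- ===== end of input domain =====

-- B replaces the dict of prefix lists + four slice-membership tests per network by one flat
-- (prefix, network) table scanned once with startswith (objective: simpler; same priority order).

-- ===== PORT A =====
-- the module-level dict issuing_network, as an association list in insertion order
def issuing_network : List (String × List String) :=
  [ ("Mir", (PySem.List.pyRange 2200 2205 1).map PySem.Int.toStr),
    ("American Express", ["34", "37"]),
    ("Visa", ["4"]),
    ("Mastercard", (PySem.List.pyRange 51 56 1).map PySem.Int.toStr),
    ("JCB", (PySem.List.pyRange 3528 3590 1).map PySem.Int.toStr),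
    ("China UnionPay", ["62"]),
    ("UzCard", ["8600"]),
    ("Humo", ["9860"]),
    ("Troy", ["65", "9792"]),
    ("Discover Card", ["6011"] ++ (PySem.List.pyRange 644 650 1).map PySem.Int.toStr ++ ["65"]),
    ("Diners Club International", ["36"]) ]

-- A's for-loop over the dict (iteration yields each network with its prefix list);
-- card_number[0] is the one-character string of c0
def getNetLoop (card_number : String) (c0 : Char) : List (String × List String) → String
  | [] => "Other"
  | (network, L) :: rest =>
    if String.singleton c0 ∈ L then network
    else if PySem.Str.slice card_number (some 0) (some 2) ∈ L then network
    else if PySem.Str.slice card_number (some 0) (some 3) ∈ L then network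
    else if PySem.Str.slice card_number (some 0) (some 4) ∈ L then network
    else getNetLoop card_number c0 rest

def get_issuing_network (card_number : String) : String :=
  match PySem.Str.pyGet? card_number 0 with
  | none => "Other"   -- Python raises IndexError at card_number[0]; excluded by Pre_
  | some c0 => getNetLoop card_number c0 issuing_network

-- ===== PORT B =====
-- the module-level PREFIX_TABLE of Source B, in the same concatenation order
def prefixTable : List (String × String) :=
  ((PySem.List.pyRange 2200 2205 1).map (fun n => (PySem.Int.toStr n, "Mir")))
  ++ [("34", "American Express"), ("37", "American Express")]
  ++ [("4", "Visa")]
  ++ ((PySem.List.pyRange 51 56 1).map (fun n => (PySem.Int.toStr n, "Mastercard")))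
  ++ ((PySem.List.pyRange 3528 3590 1).map (fun n => (PySem.Int.toStr n, "JCB")))
  ++ [("62", "China UnionPay")]
  ++ [("8600", "UzCard")]
  ++ [("9860", "Humo")]
  ++ [("65", "Troy"), ("9792", "Troy")]
  ++ [("6011", "Discover Card")]
  ++ ((PySem.List.pyRange 644 650 1).map (fun n => (PySem.Int.toStr n, "Discover Card")))
  ++ [("65", "Discover Card")]
  ++ [("36", "Diners Club International")]

-- Source B's single for-loop over the flat table
def scanTable (card_number : String) : List (String × String) → String
  | [] => "Other"
  | (p, network) :: rest =>
    if PySem.Str.startswith card_number p then network else scanTable card_number rest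

def get_issuing_network_alt (card_number : String) : String :=
  scanTable card_number prefixTable

-- ===== PRECONDITION & SPEC =====
-- Pre_ excludes only the empty string, on which A raises IndexError at card_number[0]
def Pre_get_issuing_network (card_number : String) : Prop := card_number ≠ ""
instance (card_number : String) : Decidable (Pre_get_issuing_network card_number) := by unfold Pre_get_issuing_network; infer_instance
def pvWitness_get_issuing_network : String := "4111"

def Spec_get_issuing_network (card_number : String) (out : String) : Prop := out = get_issuing_network_alt card_number
instance (card_number : String) (out : String) : Decidable (Spec_get_issuing_network card_number out) := by unfold Spec_get_issuing_network; infer_instance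

-- ===== CLAIM (what is proved, stated in full; the proofs are below) =====
def Claim_equal_get_issuing_network : Prop := ∀ (card_number : String), Dom_get_issuing_network card_number → Pre_get_issuing_network card_number → Spec_get_issuing_network card_number (get_issuing_network card_number)

-- ===== LEMMAS AND PROOFS =====

-- collapsing A's four same-valued branches into one disjunction
theorem ite_ite_or4 {p1 p2 p3 p4 : Prop} [Decidable p1] [Decidable p2] [Decidable p3] [Decidable p4]
    (net r : String) :
    (if p1 then net else if p2 then net else if p3 then net else if p4 then net else r)
      = if p1 ∨ p2 ∨ p3 ∨ p4 then net else r := by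
  split_ifs <;> tauto

theorem ite_ite_or {p1 p2 : Prop} [Decidable p1] [Decidable p2] (net r : String) :
    (if p1 then net else if p2 then net else r) = if p1 ∨ p2 then net else r := by
  split_ifs <;> tauto

theorem getNetLoop_nil (s : String) (c0 : Char) : getNetLoop s c0 [] = "Other" := rfl

-- one cons step of A's loop, with the branch chain collapsed
theorem getNetLoop_cons (s : String) (c0 : Char) (net : String) (L : List String)
    (rest : List (String × List String)) :
    getNetLoop s c0 ((net, L) :: rest)
      = if (String.singleton c0 ∈ L ∨ PySem.Str.slice s (some 0) (some 2) ∈ L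
            ∨ PySem.Str.slice s (some 0) (some 3) ∈ L ∨ PySem.Str.slice s (some 0) (some 4) ∈ L)
        then net else getNetLoop s c0 rest := by
  rw [getNetLoop, ite_ite_or4]

-- B's scan over one whole network block
theorem scanTable_block (s : String) (net : String) (L : List String) (rest : List (String × String)) :
    scanTable s (L.map (fun w => (w, net)) ++ rest)
      = if (∃ w ∈ L, PySem.Str.startswith s w = true) then net else scanTable s rest := by
  induction L with
  | nil => simp
  | cons w L ih =>
    simp only [List.map_cons, List.cons_append, scanTable, ih]
    simp only [List.exists_mem_cons_iff]
    by_cases h : PySem.Str.startswith s w = true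
    · rw [if_pos h, if_pos (Or.inl h)]
    · rw [if_neg h]
      by_cases h2 : ∃ x ∈ L, PySem.Str.startswith s x = true
      · rw [if_pos h2, if_pos (Or.inr h2)]
      · rw [if_neg h2, if_neg (fun hc => hc.elim h h2)]

-- A's four-slice membership chain is exactly "some prefix of L starts the string",
-- provided every prefix in L has length 1..4
theorem memChain_iff (s : String) (c0 : Char) (t : List Char) (hs : s.toList = c0 :: t)
    (L : List String) (hlen : ∀ w ∈ L, 1 ≤ w.toList.length ∧ w.toList.length ≤ 4) :
    (String.singleton c0 ∈ L ∨ PySem.Str.slice s (some 0) (some 2) ∈ L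
      ∨ PySem.Str.slice s (some 0) (some 3) ∈ L ∨ PySem.Str.slice s (some 0) (some 4) ∈ L)
    ↔ (∃ w ∈ L, PySem.Str.startswith s w = true) := by
  have h2 : (PySem.Str.slice s (some 0) (some 2)).toList = s.toList.take 2 := by simp [pysem]
  have h3 : (PySem.Str.slice s (some 0) (some 3)).toList = s.toList.take 3 := by simp [pysem]
  have h4 : (PySem.Str.slice s (some 0) (some 4)).toList = s.toList.take 4 := by simp [pysem]
  have hsw : ∀ w : String, (PySem.Str.startswith s w = true) ↔ w.toList <+: s.toList :=
    fun w => by simp [pysem, PySem.Chars.startswith_iff]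
  constructor
  · rintro (h | h | h | h)
    · exact ⟨_, h, (hsw _).mpr (by rw [String.toList_singleton, hs]; exact ⟨t, rfl⟩)⟩
    · exact ⟨_, h, (hsw _).mpr (by rw [h2]; exact List.take_prefix 2 _)⟩
    · exact ⟨_, h, (hsw _).mpr (by rw [h3]; exact List.take_prefix 3 _)⟩
    · exact ⟨_, h, (hsw _).mpr (by rw [h4]; exact List.take_prefix 4 _)⟩
  · rintro ⟨w, hw, hsww⟩
    have htake : s.toList.take w.toList.length = w.toList :=
      (List.prefix_iff_eq_take.mp ((hsw w).mp hsww)).symm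
    obtain ⟨hl1, hl4⟩ := hlen w hw
    have hn : w.toList.length = 1 ∨ w.toList.length = 2 ∨ w.toList.length = 3
        ∨ w.toList.length = 4 := by omega
    rcases hn with h | h | h | h
    · refine Or.inl ?_
      have hweq : String.singleton c0 = w := String.toList_inj.mp
        (by rw [String.toList_singleton, ← htake, h, hs]; rfl)
      rwa [hweq]
    · refine Or.inr (Or.inl ?_)
      have hweq : PySem.Str.slice s (some 0) (some 2) = w := String.toList_inj.mp
        (by rw [h2, ← htake, h])
      rwa [hweq]
    · refine Or.inr (Or.inr (Or.inl ?_))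
      have hweq : PySem.Str.slice s (some 0) (some 3) = w := String.toList_inj.mp
        (by rw [h3, ← htake, h])
      rwa [hweq]
    · refine Or.inr (Or.inr (Or.inr ?_))
      have hweq : PySem.Str.slice s (some 0) (some 4) = w := String.toList_inj.mp
        (by rw [h4, ← htake, h])
      rwa [hweq]

-- Source B's table, regrouped as blocks over exactly A's per-network lists
theorem tableEq : prefixTable =
    ((PySem.List.pyRange 2200 2205 1).map PySem.Int.toStr).map (fun w => (w, "Mir"))
    ++ (["34", "37"].map (fun w => (w, "American Express"))
    ++ (["4"].map (fun w => (w, "Visa"))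
    ++ (((PySem.List.pyRange 51 56 1).map PySem.Int.toStr).map (fun w => (w, "Mastercard"))
    ++ (((PySem.List.pyRange 3528 3590 1).map PySem.Int.toStr).map (fun w => (w, "JCB"))
    ++ (["62"].map (fun w => (w, "China UnionPay"))
    ++ (["8600"].map (fun w => (w, "UzCard"))
    ++ (["9860"].map (fun w => (w, "Humo"))
    ++ (["65", "9792"].map (fun w => (w, "Troy"))
    ++ (["6011"].map (fun w => (w, "Discover Card"))
    ++ (((PySem.List.pyRange 644 650 1).map PySem.Int.toStr).map (fun w => (w, "Discover Card"))
    ++ (["65"].map (fun w => (w, "Discover Card"))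
    ++ (["36"].map (fun w => (w, "Diners Club International"))
    ++ ([] : List (String × String)))))))))))))) := by
  decide

theorem main_eq (s : String) (c0 : Char) (t : List Char) (hs : s.toList = c0 :: t) :
    getNetLoop s c0 issuing_network = scanTable s prefixTable := by
  rw [tableEq]
  rw [scanTable_block, scanTable_block, scanTable_block, scanTable_block, scanTable_block,
      scanTable_block, scanTable_block, scanTable_block, scanTable_block, scanTable_block,
      scanTable_block, scanTable_block, scanTable_block]
  simp only [issuing_network, getNetLoop_cons, getNetLoop_nil]
  simp only [memChain_iff s c0 t hs ((PySem.List.pyRange 2200 2205 1).map PySem.Int.toStr) (by decide),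
             memChain_iff s c0 t hs ["34", "37"] (by decide),
             memChain_iff s c0 t hs ["4"] (by decide),
             memChain_iff s c0 t hs ((PySem.List.pyRange 51 56 1).map PySem.Int.toStr) (by decide),
             memChain_iff s c0 t hs ((PySem.List.pyRange 3528 3590 1).map PySem.Int.toStr) (by decide),
             memChain_iff s c0 t hs ["62"] (by decide),
             memChain_iff s c0 t hs ["8600"] (by decide),
             memChain_iff s c0 t hs ["9860"] (by decide),
             memChain_iff s c0 t hs ["65", "9792"] (by decide),
             memChain_iff s c0 t hs (["6011"] ++ (PySem.List.pyRange 644 650 1).map PySem.Int.toStr ++ ["65"]) (by decide),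
             memChain_iff s c0 t hs ["36"] (by decide)]
  simp only [ite_ite_or]
  simp only [List.mem_append, or_and_right, exists_or, or_assoc]
  rfl

-- ===== VERDICT (by name: the statement is the Claim_ definition above) =====
theorem get_issuing_network_spec : Claim_equal_get_issuing_network := by
  intro s _ hpre
  unfold Spec_get_issuing_network get_issuing_network get_issuing_network_alt
  have hne : s.toList ≠ [] := fun h => hpre (String.toList_eq_nil_iff.mp h)
  obtain ⟨c0, t, hs⟩ : ∃ c0 t, s.toList = c0 :: t := by
    cases h : s.toList with
    | nil => exact absurd h hne
    | cons a b => exact ⟨a, b, rfl⟩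
  have hget : PySem.Str.pyGet? s 0 = some c0 := by
    simp [hs]
  rw [hget]
  exact main_eq s c0 t hs
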